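-- pv_equiv track=rewrite | github.com/ben221199/ubuntu_click | click/commands/desktophook.py | quote_for_desktop_exec
-- ===== SOURCE A (Python) =====
-- def quote_for_desktop_exec(s):
--     """Quote a string for Exec in a .desktop file.
--
--     The rules are fairly awful.  See:
--       http://standards.freedesktop.org/desktop-entry-spec/latest/ar01s06.html
--     """
--     for c in s:
--         if c in " \t\n\"'\\><~|&;$*?#()`%":
--             break
--     else:
--         return s
--     quoted = []
--     for c in s:
--         if c in "\"`$\\":
--             quoted.append("\\" + c)
--         elif c == "%":
--             quoted.append("%%")
--         else:
--             quoted.append(c)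
--     escaped = []
--     for c in "".join(quoted):
--         if c == "\\":
--             escaped.append("\\\\")
--         else:
--             escaped.append(c)
--     return '"%s"' % "".join(escaped)
-- ===== SOURCE B (Python) =====
-- _TRIGGER = " \t\n\"'\\><~|&;$*?#()`%"
-- # net effect of A's two escaping passes, as one translate table
-- _TABLE = str.maketrans({'\\': '\\\\\\\\', '"': '\\\\"', '`': '\\\\`', '$': '\\\\$', '%': '%%'})
--
--
-- def quote_for_desktop_exec(s):
--     """Quote a string for Exec in a .desktop file."""
--     if not any(c in _TRIGGER for c in s):
--         return s
--     return '"%s"' % s.translate(_TABLE)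
-- ===== Notes on version B (the rewrite author's own statement) =====
-- stated objective: idiomatic
-- what changed: Replaced A's two sequential escaping loops (quote chars/percent, then backslash doubling) by a single table-driven pass via str.translate with a table encoding the net effect of both passes.
import Mathlib
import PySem

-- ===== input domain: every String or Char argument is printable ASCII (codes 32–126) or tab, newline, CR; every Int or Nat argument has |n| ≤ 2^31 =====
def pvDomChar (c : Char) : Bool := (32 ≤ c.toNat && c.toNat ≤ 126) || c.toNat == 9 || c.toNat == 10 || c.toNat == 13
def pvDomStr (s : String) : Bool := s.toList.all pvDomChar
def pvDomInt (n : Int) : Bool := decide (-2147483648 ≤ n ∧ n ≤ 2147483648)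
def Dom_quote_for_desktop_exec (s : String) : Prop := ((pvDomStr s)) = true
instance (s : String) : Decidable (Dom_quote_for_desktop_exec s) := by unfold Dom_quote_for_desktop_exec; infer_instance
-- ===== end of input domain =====

-- B replaces A's two sequential escaping passes by one table-driven pass encoding their net effect (objective: idiomatic/simpler); same return value.

-- ===== PORT A =====
-- the trigger set of A's first loop
def pvTrig : List Char := " \t\n\"'\\><~|&;$*?#()`%".toList

-- A's first for/else loop: scan until a trigger char is found (break) or the string ends
def pvFindTrig : List Char → Bool
  | [] => false
  | c :: rest => if c ∈ pvTrig then true else pvFindTrig rest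

def quote_for_desktop_exec (s : String) : String :=
  if pvFindTrig s.toList then
    let quoted : List String := s.toList.foldl (fun acc c =>
      if c ∈ ("\"`$\\" : String).toList then acc ++ [String.ofList ['\\', c]]
      else if c = '%' then acc ++ ["%%"]
      else acc ++ [String.ofList [c]]) []
    let escaped : List String := (String.join quoted).toList.foldl (fun acc c =>
      if c = '\\' then acc ++ ["\\\\"] else acc ++ [String.ofList [c]]) []
    "\"" ++ String.join escaped ++ "\""
  else s

-- ===== PORT B =====
-- net translation table of Source B (str.maketrans)
def pvTable (c : Char) : String :=
  if c = '\\' then "\\\\\\\\"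
  else if c = '"' ∨ c = '`' ∨ c = '$' then String.ofList ['\\', '\\', c]
  else if c = '%' then "%%"
  else String.ofList [c]

def quote_for_desktop_exec_alt (s : String) : String :=
  if s.toList.any (· ∈ pvTrig) then
    "\"" ++ String.join (s.toList.map pvTable) ++ "\""
  else s

-- ===== PRECONDITION & SPEC =====
def Spec_quote_for_desktop_exec (s : String) (out : String) : Prop := out = quote_for_desktop_exec_alt s
instance (s : String) (out : String) : Decidable (Spec_quote_for_desktop_exec s out) := by unfold Spec_quote_for_desktop_exec; infer_instance

-- ===== CLAIM (what is proved, stated in full; the proofs are below) =====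
def Claim_equal_quote_for_desktop_exec : Prop := ∀ (s : String), Dom_quote_for_desktop_exec s → Spec_quote_for_desktop_exec s (quote_for_desktop_exec s)

-- ===== LEMMAS AND PROOFS =====

-- A's first-pass piece for one character
def pvQA (c : Char) : String :=
  if c ∈ ("\"`$\\" : String).toList then String.ofList ['\\', c]
  else if c = '%' then "%%"
  else String.ofList [c]

-- A's second-pass piece for one character
def pvEA (c : Char) : String :=
  if c = '\\' then "\\\\" else String.ofList [c]

theorem pvFindTrig_eq_any (l : List Char) : pvFindTrig l = l.any (· ∈ pvTrig) := by
  induction l with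
  | nil => rfl
  | cons c rest ih =>
    simp only [pvFindTrig, List.any_cons, ih]
    split_ifs with h <;> simp [h]

theorem quotedFold (l : List Char) (acc : List String) :
    l.foldl (fun acc c =>
      if c ∈ ("\"`$\\" : String).toList then acc ++ [String.ofList ['\\', c]]
      else if c = '%' then acc ++ ["%%"]
      else acc ++ [String.ofList [c]]) acc = acc ++ l.map pvQA := by
  induction l generalizing acc with
  | nil => simp
  | cons c rest ih =>
    simp only [List.foldl_cons, List.map_cons, ih, pvQA]
    split_ifs <;> simp

theorem escFold (l : List Char) (acc : List String) :
    l.foldl (fun acc c =>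
      if c = '\\' then acc ++ ["\\\\"] else acc ++ [String.ofList [c]]) acc
      = acc ++ l.map pvEA := by
  induction l generalizing acc with
  | nil => simp
  | cons c rest ih =>
    simp only [List.foldl_cons, List.map_cons, ih, pvEA]
    split_ifs <;> simp

theorem join_fold (xs : List String) (a : String) :
    xs.foldl (· ++ ·) a = a ++ String.join xs := by
  induction xs generalizing a with
  | nil => simp [String.join]
  | cons x xs ih =>
    simp only [String.join, List.foldl_cons]
    rw [ih, ih ("" ++ x)]
    simp [String.append_assoc]

theorem join_append (a b : List String) :
    String.join (a ++ b) = String.join a ++ String.join b := by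
  simp only [String.join, List.foldl_append]
  rw [join_fold]
  rfl

-- per-character: the second pass applied to A's first-pass piece is B's table entry
theorem perChar (c : Char) :
    String.join ((pvQA c).toList.map pvEA) = pvTable c := by
  by_cases h : c ∈ ("\"`$\\" : String).toList
  · simp only [pvQA, if_pos h]
    have : c = '"' ∨ c = '`' ∨ c = '$' ∨ c = '\\' := by
      have e : ("\"`$\\" : String).toList = ['"', '`', '$', '\\'] := by decide
      rw [e] at h; simpa using h
    rcases this with h | h | h | h <;> subst h <;> decide
  · have h1 : c ≠ '"' ∧ c ≠ '`' ∧ c ≠ '$' ∧ c ≠ '\\' := by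
      constructor
      · intro hc; exact h (by simp [hc])
      constructor
      · intro hc; exact h (by simp [hc])
      constructor
      · intro hc; exact h (by simp [hc])
      · intro hc; exact h (by simp [hc])
    obtain ⟨h2, h3, h4, h5⟩ := h1
    by_cases hp : c = '%'
    · subst hp; decide
    · simp [pvQA, pvEA, pvTable, hp, h2, h3, h4, h5, String.join]

theorem join_cons (x : String) (xs : List String) :
    String.join (x :: xs) = x ++ String.join xs := by
  have e : x :: xs = [x] ++ xs := rfl
  rw [e, join_append]; simp [String.join]

theorem key (l : List Char) :
    String.join ((String.join (l.map pvQA)).toList.map pvEA)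
      = String.join (l.map pvTable) := by
  induction l with
  | nil => decide
  | cons c rest ih =>
    rw [List.map_cons, List.map_cons, join_cons, join_cons, String.toList_append,
      List.map_append, join_append, perChar, ih]

-- ===== VERDICT (by name: the statement is the Claim_ definition above) =====
theorem quote_for_desktop_exec_spec : Claim_equal_quote_for_desktop_exec := by
  intro s _
  unfold Spec_quote_for_desktop_exec quote_for_desktop_exec quote_for_desktop_exec_alt
  rw [pvFindTrig_eq_any]
  by_cases h : s.toList.any (· ∈ pvTrig)
  · simp only [h, if_true, quotedFold, escFold, List.nil_append, key]
  · simp [h]
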